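-- pv_equiv track=rewrite | github.com/GyroSuperintelligence/BabyLM | baby-legacy/governance.py | token_last_intron
-- ===== SOURCE A (Python) =====
-- GENE_Mic_S = 0xAA  # 10101010 binary, stateless constant
--
-- def token_last_intron(token_id: int) -> int:
--     """
--     Get the last intron byte for a token ID using the ψ isomorphism.
--
--     Converts token_id to LEB128 bytes, applies XOR 0xAA transformation,
--     and returns the final byte which encodes the token's decisive action.
--
--     Args:
--         token_id: Token ID from the tokenizer
--
--     Returns:
--         Last intron byte (0-255) for this token
--     """
--     if token_id < 0:
--         raise ValueError("Token ID must be non-negative")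
--
--     # Convert to LEB128 bytes
--     leb_bytes = []
--     val = token_id
--     while True:
--         byte = val & 0x7F
--         val >>= 7
--         if val == 0:
--             leb_bytes.append(byte)
--             break
--         else:
--             leb_bytes.append(byte | 0x80)
--
--     # Apply ψ isomorphism (XOR with 0xAA) to get introns
--     introns = [b ^ GENE_Mic_S for b in leb_bytes]
--
--     # Return the last (decisive) intron
--     return introns[-1] if introns else 0
-- ===== SOURCE B (Python) =====
-- GENE_Mic_S = 0xAA
--
-- def token_last_intron(token_id: int) -> int:
--     if token_id < 0:
--         raise ValueError("Token ID must be non-negative")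
--     shift = ((token_id.bit_length() - 1) // 7) * 7 if token_id > 0 else 0
--     return ((token_id >> shift) & 0x7F) ^ GENE_Mic_S
-- ===== Notes on version B (the rewrite author's own statement) =====
-- stated objective: simpler
-- what changed: Replaced the LEB128 byte-building loop and intermediate lists with a closed-form extraction of the most-significant 7-bit group via bit_length, XORed with 0xAA.
import Mathlib
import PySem

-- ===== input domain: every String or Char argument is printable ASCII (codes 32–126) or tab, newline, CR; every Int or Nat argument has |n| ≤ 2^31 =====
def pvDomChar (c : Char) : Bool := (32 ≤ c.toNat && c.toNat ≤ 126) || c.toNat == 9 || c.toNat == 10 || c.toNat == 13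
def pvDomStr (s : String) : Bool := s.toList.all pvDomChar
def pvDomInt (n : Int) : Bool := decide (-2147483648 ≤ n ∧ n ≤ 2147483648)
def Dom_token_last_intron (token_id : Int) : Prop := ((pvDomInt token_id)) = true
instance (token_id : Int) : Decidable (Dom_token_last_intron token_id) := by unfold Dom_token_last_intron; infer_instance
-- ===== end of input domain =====

-- B replaces A's LEB128 byte-building loop by a closed-form extraction of the
-- most-significant 7-bit group (simpler, no intermediate lists).


-- ===== PORT A =====
-- A's `while True` loop; val is nonnegative throughout (Pre_ excludes negatives),
-- so it is carried as a Nat: `val & 0x7F` = `&&& 0x7F`, `val >>= 7` = `>>> 7`.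
def lebLoop (val : Nat) (acc : List Nat) : List Nat :=
  let byte := val &&& 0x7F
  let val' := val >>> 7
  if val' = 0 then acc ++ [byte]
  else lebLoop val' (acc ++ [byte ||| 0x80])
termination_by val
decreasing_by
  simp only [Nat.shiftRight_eq_div_pow] at *
  omega

def token_last_intron (token_id : Int) : Int :=
  if token_id < 0 then 0   -- Python raises ValueError here; excluded by Pre_
  else
    let leb_bytes := lebLoop token_id.toNat []
    let introns : List Nat := leb_bytes.map (fun b => b ^^^ 0xAA)
    match PySem.List.pyGet? introns (-1) with   -- introns[-1] if introns else 0
    | some b => (b : Int)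
    | none => 0

-- ===== PORT B =====
-- int.bit_length for nonnegative n
def pyBitLength (n : Nat) : Nat := if n = 0 then 0 else Nat.log2 n + 1

def token_last_intron_alt (token_id : Int) : Int :=
  if token_id < 0 then 0   -- Python raises ValueError here; excluded by Pre_
  else
    let n := token_id.toNat
    let shift := if 0 < token_id then ((pyBitLength n - 1) / 7) * 7 else 0
    (((((n >>> shift) &&& 0x7F) ^^^ 0xAA : Nat)) : Int)

-- ===== PRECONDITION & SPEC =====
-- Pre_ excludes exactly the negative token ids, on which Python A raises ValueError.
def Pre_token_last_intron (token_id : Int) : Prop := 0 ≤ token_id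
instance (token_id : Int) : Decidable (Pre_token_last_intron token_id) := by unfold Pre_token_last_intron; infer_instance
def pvWitness_token_last_intron : Int := (300)

def Spec_token_last_intron (token_id : Int) (out : Int) : Prop := out = token_last_intron_alt token_id
instance (token_id : Int) (out : Int) : Decidable (Spec_token_last_intron token_id out) := by unfold Spec_token_last_intron; infer_instance

-- ===== CLAIM (what is proved, stated in full; the proofs are below) =====
def Claim_equal_token_last_intron : Prop := ∀ (token_id : Int), Dom_token_last_intron token_id → Pre_token_last_intron token_id → Spec_token_last_intron token_id (token_last_intron token_id)

-- ===== LEMMAS AND PROOFS =====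

-- the last byte produced by A's loop is the most-significant 7-bit group of n
theorem lebLoop_getLast? (n : Nat) (acc : List Nat) :
    (lebLoop n acc).getLast? = some ((n >>> (((pyBitLength n - 1) / 7) * 7)) &&& 0x7F) := by
  induction n using Nat.strong_induction_on generalizing acc with
  | _ n ih =>
    rw [lebLoop]
    by_cases h : n >>> 7 = 0
    · simp only [h, if_true, List.getLast?_append]
      have hn : n < 128 := by
        simp only [Nat.shiftRight_eq_div_pow] at h; omega
      have hs : ((pyBitLength n - 1) / 7) * 7 = 0 := by
        rcases Nat.eq_zero_or_pos n with h0 | h0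
        · simp [pyBitLength, h0]
        · have : Nat.log2 n < 7 := (Nat.log2_lt (by omega)).2 (by omega)
          simp only [pyBitLength, if_neg (by omega : ¬ n = 0)]
          omega
      simp [hs]
    · simp only [h, if_false]
      have hlt : n >>> 7 < n := by
        simp only [Nat.shiftRight_eq_div_pow] at h ⊢
        exact Nat.div_lt_self (by omega) (by norm_num)
      rw [ih (n >>> 7) hlt _]
      congr 1
      have hn : 128 ≤ n := by
        simp only [Nat.shiftRight_eq_div_pow] at h; omega
      have hq : n >>> 7 = n / 128 := by
        simp [Nat.shiftRight_eq_div_pow]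
      have hlog : Nat.log2 (n / 128) = Nat.log2 n - 7 := by
        have hd : n / 128 = n / 2 / 2 / 2 / 2 / 2 / 2 / 2 := by omega
        simp only [Nat.log2_eq_log_two]
        rw [hd]
        simp only [Nat.log_div_base]
        omega
      have hge : 7 ≤ Nat.log2 n := (Nat.le_log2 (by omega)).2 (by omega)
      have hq0 : n >>> 7 ≠ 0 := h
      have hs : ((pyBitLength n - 1) / 7) * 7
          = ((pyBitLength (n >>> 7) - 1) / 7) * 7 + 7 := by
        simp only [pyBitLength, hq, if_neg (by omega : ¬ n = 0), hlog]
        rw [if_neg (by omega : ¬ n / 128 = 0)]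
        omega
      rw [hs, Nat.add_comm, Nat.shiftRight_add]

-- ===== VERDICT (by name: the statement is the Claim_ definition above) =====
theorem token_last_intron_spec : Claim_equal_token_last_intron := by
  intro t _ hpre
  unfold Pre_token_last_intron at hpre
  unfold Spec_token_last_intron token_last_intron token_last_intron_alt
  have hnn : ¬ t < 0 := by omega
  simp only [if_neg hnn]
  rw [PySem.List.pyGet?_neg_one, List.getLast?_map, lebLoop_getLast?]
  simp only [Option.map_some]
  by_cases hpos : 0 < t
  · simp [if_pos hpos]
  · have ht : t = 0 := by omega
    subst ht
    simp [pyBitLength]
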